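-- pv_equiv track=rewrite | github.com/jimsweb/aiMIDI | src/midigegen/data/augment.py | transpose_token_sequence
-- ===== SOURCE A (Python) =====
-- from typing import Iterable, List
--
-- def transpose_token_sequence(tokens: List[int], pitch_change: int, id_to_event: dict[int, str], event_to_id: dict[str, int]) -> List[int]:
--     """Transpose pitch in Note_<p>_Dur_<d> tokens by `pitch_change` semitones.
--
--     Tokens outside 0..127 after transpose are clipped.
--     """
--
--     out: List[int] = []
--     for t in tokens:
--         s = id_to_event.get(int(t), "")
--         if s.startswith("Note_") and "_Dur_" in s:
--             _, rest = s.split("Note_")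
--             p_str, d_str = rest.split("_Dur_")
--             p = max(0, min(127, int(p_str) + pitch_change))
--             d = int(d_str)
--             out.append(event_to_id.get(f"Note_{p}_Dur_{d}", t))
--         else:
--             out.append(t)
--     return out
-- ===== SOURCE B (Python) =====
-- from typing import List
--
-- def transpose_token_sequence(tokens: List[int], pitch_change: int, id_to_event: dict[int, str], event_to_id: dict[str, int]) -> List[int]:
--     # Build the token remapping once from the vocabulary, then map tokens through it.
--     remap: dict[int, int] = {}
--     for i, s in id_to_event.items():
--         if not (s.startswith("Note_") and "_Dur_" in s):
--             continue
--         parts = s.split("Note_")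
--         if len(parts) != 2:
--             continue
--         dparts = parts[1].split("_Dur_")
--         if len(dparts) != 2:
--             continue
--         try:
--             p = int(dparts[0])
--             d = int(dparts[1])
--         except ValueError:
--             continue
--         p = max(0, min(127, p + pitch_change))
--         key = f"Note_{p}_Dur_{d}"
--         if key in event_to_id:
--             remap[i] = event_to_id[key]
--     return [remap.get(int(t), t) for t in tokens]
-- ===== Notes on version B (the rewrite author's own statement) =====
-- stated objective: alternative
-- what changed: B builds a token->token remap dictionary in a single pass over the id_to_event vocabulary (parsing each event string once) and then maps tokens through dictionary lookups, instead of A's re-parsing and re-splitting an event string for every token.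
import Mathlib
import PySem

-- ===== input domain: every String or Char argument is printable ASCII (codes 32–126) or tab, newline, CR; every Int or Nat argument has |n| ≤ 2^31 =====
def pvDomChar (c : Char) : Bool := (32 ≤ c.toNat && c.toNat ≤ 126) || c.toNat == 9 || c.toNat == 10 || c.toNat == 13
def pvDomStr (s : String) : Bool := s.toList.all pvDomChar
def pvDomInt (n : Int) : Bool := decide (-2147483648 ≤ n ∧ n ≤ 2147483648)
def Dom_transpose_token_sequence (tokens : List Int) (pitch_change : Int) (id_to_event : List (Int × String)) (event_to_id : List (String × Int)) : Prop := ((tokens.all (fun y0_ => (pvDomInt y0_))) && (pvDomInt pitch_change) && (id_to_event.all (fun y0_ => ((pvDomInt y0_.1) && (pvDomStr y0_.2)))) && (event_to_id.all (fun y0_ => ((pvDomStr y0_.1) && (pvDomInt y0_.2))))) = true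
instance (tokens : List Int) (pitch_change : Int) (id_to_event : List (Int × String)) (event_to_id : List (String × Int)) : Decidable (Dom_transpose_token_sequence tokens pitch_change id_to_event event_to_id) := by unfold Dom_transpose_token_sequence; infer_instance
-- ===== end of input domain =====

-- B replaces A's per-token parsing with one indexing pass over the vocabulary followed by pure dictionary lookups (objective: alternative decomposition).

-- ===== PORT A =====
def transpose_token_sequence (tokens : List Int) (pitch_change : Int) (id_to_event : List (Int × String)) (event_to_id : List (String × Int)) : List Int :=
  tokens.foldl (fun out t =>
    let s := (PySem.Dict.ofList id_to_event).getD t ""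
    if PySem.Str.startswith s "Note_" && PySem.Str.isIn "_Dur_" s then
      match (PySem.Str.split? s "Note_").getD [] with
      | [_, rest] =>
        match (PySem.Str.split? rest "_Dur_").getD [] with
        | [p_str, d_str] =>
          match PySem.Int.ofStr? p_str, PySem.Int.ofStr? d_str with
          | some pv, some dv =>
            let p := max 0 (min 127 (pv + pitch_change))
            out ++ [(PySem.Dict.ofList event_to_id).getD ("Note_" ++ PySem.Int.toStr p ++ "_Dur_" ++ PySem.Int.toStr dv) t]
          | _, _ => out ++ [t]  -- Python raises ValueError here (int() fails); outside Pre_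
        | _ => out ++ [t]       -- Python raises ValueError here (unpack ≠ 2 parts); outside Pre_
      | _ => out ++ [t]         -- Python raises ValueError here (unpack ≠ 2 parts); outside Pre_
    else out ++ [t]) []

-- ===== PORT B =====
-- parse one vocabulary entry: the transposed token id, if the entry is a note and the transposed key exists
def pvParseEntry (pitch_change : Int) (event_to_id : PySem.Dict String Int) (s : String) : Option Int :=
  if PySem.Str.startswith s "Note_" && PySem.Str.isIn "_Dur_" s then
    let parts := (PySem.Str.split? s "Note_").getD []
    if parts.length ≠ 2 then none
    else
      let dparts := (PySem.Str.split? (PySem.List.pyGetD parts 1 "") "_Dur_").getD []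
      if dparts.length ≠ 2 then none
      else
        -- try: int(dparts[0]); int(dparts[1]); except ValueError: skip  (= bind on the Options)
        (PySem.Int.ofStr? (PySem.List.pyGetD dparts 0 "")).bind fun pv =>
        (PySem.Int.ofStr? (PySem.List.pyGetD dparts 1 "")).bind fun dv =>
          let p := max 0 (min 127 (pv + pitch_change))
          event_to_id.get? ("Note_" ++ PySem.Int.toStr p ++ "_Dur_" ++ PySem.Int.toStr dv)
  else none

def transpose_token_sequence_alt (tokens : List Int) (pitch_change : Int) (id_to_event : List (Int × String)) (event_to_id : List (String × Int)) : List Int :=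
  let e2i := PySem.Dict.ofList event_to_id
  let remap := (PySem.Dict.ofList id_to_event).items.foldl
    (fun d p =>
      match pvParseEntry pitch_change e2i p.2 with
      | some v => d.insert p.1 v
      | none => d) PySem.Dict.empty
  tokens.map (fun t => remap.getD t t)

-- ===== PRECONDITION & SPEC =====
-- an event string is OK when, if it looks like a note, its two splits unpack into exactly two parts and both parts parse as ints
def pvOkEvent (s : String) : Bool :=
  !(PySem.Str.startswith s "Note_" && PySem.Str.isIn "_Dur_" s) ||
  (let parts := (PySem.Str.split? s "Note_").getD []
   let dparts := (PySem.Str.split? (PySem.List.pyGetD parts 1 "") "_Dur_").getD []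
   parts.length == 2 && dparts.length == 2 &&
   (PySem.Int.ofStr? (PySem.List.pyGetD dparts 0 "")).isSome &&
   (PySem.Int.ofStr? (PySem.List.pyGetD dparts 1 "")).isSome)

-- Pre_ excludes exactly the inputs where Python A raises ValueError: some token maps to an event string
-- that starts with "Note_" and contains "_Dur_" but has extra "Note_"/"_Dur_" occurrences or non-int fields.
def Pre_transpose_token_sequence (tokens : List Int) (pitch_change : Int) (id_to_event : List (Int × String)) (event_to_id : List (String × Int)) : Prop :=
  ∀ t ∈ tokens, pvOkEvent ((PySem.Dict.ofList id_to_event).getD t "") = true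
instance (tokens : List Int) (pitch_change : Int) (id_to_event : List (Int × String)) (event_to_id : List (String × Int)) : Decidable (Pre_transpose_token_sequence tokens pitch_change id_to_event event_to_id) := by unfold Pre_transpose_token_sequence; infer_instance

def pvWitness_transpose_token_sequence : List Int × Int × (List (Int × String)) × (List (String × Int)) :=
  ([1, 5], 2, [(1, "Note_60_Dur_4")], [("Note_62_Dur_4", 9)])

def Spec_transpose_token_sequence (tokens : List Int) (pitch_change : Int) (id_to_event : List (Int × String)) (event_to_id : List (String × Int)) (out : List Int) : Prop := out = transpose_token_sequence_alt tokens pitch_change id_to_event event_to_id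
instance (tokens : List Int) (pitch_change : Int) (id_to_event : List (Int × String)) (event_to_id : List (String × Int)) (out : List Int) : Decidable (Spec_transpose_token_sequence tokens pitch_change id_to_event event_to_id out) := by unfold Spec_transpose_token_sequence; infer_instance

-- ===== CLAIM (what is proved, stated in full; the proofs are below) =====
def Claim_equal_transpose_token_sequence : Prop := ∀ (tokens : List Int) (pitch_change : Int) (id_to_event : List (Int × String)) (event_to_id : List (String × Int)), Dom_transpose_token_sequence tokens pitch_change id_to_event event_to_id → Pre_transpose_token_sequence tokens pitch_change id_to_event event_to_id → Spec_transpose_token_sequence tokens pitch_change id_to_event event_to_id (transpose_token_sequence tokens pitch_change id_to_event event_to_id)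

-- ===== LEMMAS AND PROOFS =====

-- B's remap dictionary, looked up at t, is "parse whatever event string t maps to"
theorem pvRemap_get (pc : Int) (e2i : PySem.Dict String Int) :
    ∀ (l : List (Int × String)), (l.map Prod.fst).Nodup → ∀ (d : PySem.Dict Int Int) (t : Int),
    (l.foldl (fun d p =>
      match pvParseEntry pc e2i p.2 with
      | some v => d.insert p.1 v
      | none => d) d).get? t
      = (((PySem.Dict.mk l).get? t).bind (pvParseEntry pc e2i)).or (d.get? t) := by
  intro l
  induction l with
  | nil => intro _ d t; simp [PySem.Dict.get?]
  | cons x xs ih =>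
    intro h d t
    have hx : x.1 ∉ xs.map Prod.fst := (List.nodup_cons.mp h).1
    have hxs : (xs.map Prod.fst).Nodup := (List.nodup_cons.mp h).2
    rw [List.foldl_cons]
    by_cases ht : x.1 = t
    · subst ht
      have hnone : (PySem.Dict.mk xs).get? x.1 = none := by
        rw [PySem.Dict.get?_eq_none_iff_not_mem_keys]; simpa [PySem.Dict.keys] using hx
      rcases hp : pvParseEntry pc e2i x.2 with _ | v
      · rw [ih hxs d x.1, PySem.Dict.get?_mk_cons]
        simp [hnone, hp]
      · rw [ih hxs (d.insert x.1 v) x.1, PySem.Dict.get?_mk_cons]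
        simp [hnone, hp, PySem.Dict.get?_insert_self]
    · have hbe : (x.1 == t) = false := by simpa using ht
      rcases hp : pvParseEntry pc e2i x.2 with _ | v
      · rw [ih hxs d t, PySem.Dict.get?_mk_cons]
        simp [hbe]
      · rw [ih hxs (d.insert x.1 v) t, PySem.Dict.get?_mk_cons, PySem.Dict.get?_insert]
        have ht' : ¬ t = x.1 := fun hh => ht hh.symm
        simp [hbe, ht']

-- a Dict is the mk of its items
theorem pvDict_eta {k v : Type} [BEq k] (d : PySem.Dict k v) : PySem.Dict.mk d.items = d := by
  apply PySem.Dict.ext; rfl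

-- per-token agreement: A's loop body appends exactly B's lookup for an OK token
theorem pvToken (pc : Int) (i2e : List (Int × String)) (e2i : List (String × Int)) (t : Int)
    (hok : pvOkEvent ((PySem.Dict.ofList i2e).getD t "") = true) (acc : List Int) :
    (let s := (PySem.Dict.ofList i2e).getD t ""
     if PySem.Str.startswith s "Note_" && PySem.Str.isIn "_Dur_" s then
      match (PySem.Str.split? s "Note_").getD [] with
      | [_, rest] =>
        match (PySem.Str.split? rest "_Dur_").getD [] with
        | [p_str, d_str] =>
          match PySem.Int.ofStr? p_str, PySem.Int.ofStr? d_str with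
          | some pv, some dv =>
            let p := max 0 (min 127 (pv + pc))
            acc ++ [(PySem.Dict.ofList e2i).getD ("Note_" ++ PySem.Int.toStr p ++ "_Dur_" ++ PySem.Int.toStr dv) t]
          | _, _ => acc ++ [t]
        | _ => acc ++ [t]
      | _ => acc ++ [t]
     else acc ++ [t])
    = acc ++ [(((PySem.Dict.ofList i2e).get? t).bind (pvParseEntry pc (PySem.Dict.ofList e2i))).getD t] := by
  rcases hG : (PySem.Dict.ofList i2e).get? t with _ | s
  · have hs : (PySem.Dict.ofList i2e).getD t "" = "" := by
      rw [PySem.Dict.getD_eq_get?_getD, hG]; rfl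
    have hc : (PySem.Str.startswith "" "Note_" && PySem.Str.isIn "_Dur_" "") = false := by decide
    simp only [hs, Option.bind_none, Option.getD_none, hc, Bool.false_eq_true, if_false]
  · have hs : (PySem.Dict.ofList i2e).getD t "" = s := by
      rw [PySem.Dict.getD_eq_get?_getD, hG]; rfl
    rw [hs] at hok
    simp only [hs, Option.bind_some]
    rcases hc : (PySem.Str.startswith s "Note_" && PySem.Str.isIn "_Dur_" s) with _ | _
    · simp only [pvParseEntry, hc, Bool.false_eq_true, if_false, Option.getD_none]
    · simp only [pvOkEvent, hc, Bool.not_true, Bool.false_or, Bool.and_eq_true, beq_iff_eq,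
        Option.isSome_iff_exists] at hok
      obtain ⟨⟨⟨hl1, hl2⟩, ⟨pv, h3⟩⟩, ⟨dv, h4⟩⟩ := hok
      obtain ⟨a, rest, h1⟩ := List.length_eq_two.mp hl1
      rw [h1] at hl2 h3 h4
      have e1 : PySem.List.pyGetD [a, rest] (1 : Int) "" = rest := rfl
      rw [e1] at hl2 h3 h4
      obtain ⟨p_str, d_str, h2⟩ := List.length_eq_two.mp hl2
      rw [h2] at h3 h4
      have e2 : PySem.List.pyGetD [p_str, d_str] (0 : Int) "" = p_str := rfl
      have e3 : PySem.List.pyGetD [p_str, d_str] (1 : Int) "" = d_str := rfl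
      rw [e2] at h3; rw [e3] at h4
      simp only [pvParseEntry, hc, if_true, h1, h2, e1, e2, e3, h3, h4, List.length_cons,
        List.length_nil, Option.bind_some]
      simp [PySem.Dict.getD_eq_get?_getD]

-- A's fold, under Pre_, is B's map
theorem pvFoldA (pc : Int) (i2e : List (Int × String)) (e2i : List (String × Int)) :
    ∀ (ts : List Int) (acc : List Int),
    (∀ t ∈ ts, pvOkEvent ((PySem.Dict.ofList i2e).getD t "") = true) →
    ts.foldl (fun out t =>
      let s := (PySem.Dict.ofList i2e).getD t ""
      if PySem.Str.startswith s "Note_" && PySem.Str.isIn "_Dur_" s then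
        match (PySem.Str.split? s "Note_").getD [] with
        | [_, rest] =>
          match (PySem.Str.split? rest "_Dur_").getD [] with
          | [p_str, d_str] =>
            match PySem.Int.ofStr? p_str, PySem.Int.ofStr? d_str with
            | some pv, some dv =>
              let p := max 0 (min 127 (pv + pc))
              out ++ [(PySem.Dict.ofList e2i).getD ("Note_" ++ PySem.Int.toStr p ++ "_Dur_" ++ PySem.Int.toStr dv) t]
            | _, _ => out ++ [t]
          | _ => out ++ [t]
        | _ => out ++ [t]
      else out ++ [t]) acc
    = acc ++ ts.map (fun t => (((PySem.Dict.ofList i2e).get? t).bind (pvParseEntry pc (PySem.Dict.ofList e2i))).getD t) := by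
  intro ts
  induction ts with
  | nil => intro acc _; simp
  | cons t ts ih =>
    intro acc hpre
    rw [List.foldl_cons, ih _ (fun u hu => hpre u (List.mem_cons_of_mem _ hu)),
      pvToken pc i2e e2i t (hpre t (List.mem_cons_self)) acc]
    simp

-- ===== VERDICT (by name: the statement is the Claim_ definition above) =====
theorem transpose_token_sequence_spec : Claim_equal_transpose_token_sequence := by
  intro tokens pc i2e e2i _ hpre
  unfold Spec_transpose_token_sequence transpose_token_sequence transpose_token_sequence_alt
  rw [pvFoldA pc i2e e2i tokens [] hpre]
  simp only [List.nil_append]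
  apply List.map_congr_left
  intro t _
  have hnd : ((PySem.Dict.ofList i2e).items.map Prod.fst).Nodup := by
    have := PySem.Dict.nodup_keys_ofList (κ := Int) (ν := String) i2e
    simpa [PySem.Dict.keys] using this
  conv_rhs => rw [PySem.Dict.getD_eq_get?_getD,
    pvRemap_get pc (PySem.Dict.ofList e2i) (PySem.Dict.ofList i2e).items hnd PySem.Dict.empty t,
    pvDict_eta, PySem.Dict.get?_empty, Option.or_none]
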